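-- pv_equiv track=rewrite | github.com/fallingstar3107/Algorithmic-Toolbox | Dynamic Programming/Primitive Calculator/primitive_calculator.py | compute_operations_greedy
-- ===== SOURCE A (Python) =====
-- def compute_operations_greedy(n):
--     assert 1 <= n <= 10 ** 6
--     num_operations = 0
--     current_number = 1
--     while current_number <= n:
--         if current_number <= n/3:
--             current_number *= 3
--         elif current_number <= n/2:
--             current_number *= 2
--         else:
--             current_number += 1
--         num_operations+= 1
--     return num_operations
-- ===== SOURCE B (Python) =====
-- def compute_operations_greedy(n):
--     assert 1 <= n <= 10 ** 6
--     count = 0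
--     current = 1
--     # phase 1: multiply by 3 while possible
--     while 3 * current <= n:
--         current *= 3
--         count += 1
--     # at most one doubling is ever possible afterwards
--     if 2 * current <= n:
--         current *= 2
--         count += 1
--     # the remaining +1 steps (the loop runs one step past n)
--     return count + (n - current + 1)
-- ===== Notes on version B (the rewrite author's own statement) =====
-- stated objective: faster
-- what changed: A simulates every single operation (including each of the O(n) +1 steps) in one while loop; B runs only the short *3 phase, does the single possible *2 with one check, and replaces the entire +1 tail with the closed-form n - current + 1.
import Mathlib
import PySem

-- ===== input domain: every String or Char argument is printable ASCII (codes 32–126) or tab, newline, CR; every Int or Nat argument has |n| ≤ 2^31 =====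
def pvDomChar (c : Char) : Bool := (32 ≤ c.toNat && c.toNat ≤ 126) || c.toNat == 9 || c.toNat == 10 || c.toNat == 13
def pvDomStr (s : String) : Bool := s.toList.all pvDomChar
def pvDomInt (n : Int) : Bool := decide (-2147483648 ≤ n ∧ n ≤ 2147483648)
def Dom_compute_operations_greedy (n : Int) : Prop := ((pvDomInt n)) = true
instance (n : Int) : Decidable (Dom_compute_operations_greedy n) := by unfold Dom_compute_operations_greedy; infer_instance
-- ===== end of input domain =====

-- B replaces A's step-by-step simulation (O(n) +1 steps) by the *3 phase, one *2 check and a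
-- closed-form count of the +1 tail (faster, asymptotic: O(log n) vs O(n)).

-- ===== PORT A =====
-- A's while loop, with a Nat fuel solely to make the very same iteration total; fuel (n+1).toNat
-- never runs out on Pre_'s inputs (each pass raises `current` by at least 1, so at most n passes).
-- The Python comparisons `current <= n/3` / `current <= n/2` use float division, which for
-- 1 ≤ n ≤ 10^6 (guaranteed by A's assert, hence by Pre_) is exact: they coincide with the integer
-- comparisons 3*current ≤ n / 2*current ≤ n used here (a float error < 2^-30 cannot cross the
-- ≥ 1/3 gap between n/3 and any integer other than n/3 itself).
def computeLoopA (fuel : Nat) (n c ops : Int) : Int :=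
  match fuel with
  | 0 => ops
  | f + 1 =>
    if c ≤ n then
      if 3 * c ≤ n then computeLoopA f n (3 * c) (ops + 1)
      else if 2 * c ≤ n then computeLoopA f n (2 * c) (ops + 1)
      else computeLoopA f n (c + 1) (ops + 1)
    else ops

def compute_operations_greedy (n : Int) : Int := computeLoopA (n + 1).toNat n 1 0

-- ===== PORT B =====
-- B's *3 phase, returning (current, count); same fuel remark and same exact-float remark as above.
def computeLoopB3 (fuel : Nat) (n c count : Int) : Int × Int :=
  match fuel with
  | 0 => (c, count)
  | f + 1 =>
    if 3 * c ≤ n then computeLoopB3 f n (3 * c) (count + 1) else (c, count)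

def compute_operations_greedy_alt (n : Int) : Int :=
  let p := computeLoopB3 (n + 1).toNat n 1 0
  if 2 * p.1 ≤ n then (p.2 + 1) + (n - 2 * p.1 + 1) else p.2 + (n - p.1 + 1)

-- ===== PRECONDITION & SPEC =====
-- Pre_ = exactly A's assert: outside 1 ≤ n ≤ 10^6 the Python A raises AssertionError.
def Pre_compute_operations_greedy (n : Int) : Prop := 1 ≤ n ∧ n ≤ 10 ^ 6
instance (n : Int) : Decidable (Pre_compute_operations_greedy n) := by unfold Pre_compute_operations_greedy; infer_instance
def pvWitness_compute_operations_greedy : Int := 10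

def Spec_compute_operations_greedy (n : Int) (out : Int) : Prop := out = compute_operations_greedy_alt n
instance (n : Int) (out : Int) : Decidable (Spec_compute_operations_greedy n out) := by unfold Spec_compute_operations_greedy; infer_instance

-- ===== CLAIM (what is proved, stated in full; the proofs are below) =====
def Claim_equal_compute_operations_greedy : Prop := ∀ (n : Int), Dom_compute_operations_greedy n → Pre_compute_operations_greedy n → Spec_compute_operations_greedy n (compute_operations_greedy n)

-- ===== LEMMAS AND PROOFS =====

-- Once doubling is impossible (n < 2*c), A's loop only does +1 steps: closed form.
theorem computeLoopA_tail (fuel : Nat) (n c ops : Int) (h : 1 ≤ c) (h2 : n < 2 * c)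
    (hf : (n + 1 - c).toNat < fuel) :
    computeLoopA fuel n c ops = if c ≤ n then ops + (n - c + 1) else ops := by
  induction fuel generalizing c ops with
  | zero => omega
  | succ f ih =>
    unfold computeLoopA
    by_cases hc : c ≤ n
    · have h3 : ¬ 3 * c ≤ n := by omega
      have h4 : ¬ 2 * c ≤ n := by omega
      simp only [if_pos hc, if_neg h3, if_neg h4]
      rw [ih (c + 1) (ops + 1) (by omega) (by omega) (by omega)]
      split_ifs <;> omega
    · simp [hc]

-- A's loop from any reachable state equals B's *3 phase followed by B's closed-form finish.
theorem computeLoopA_eq (fA fB : Nat) (n c ops : Int) (h : 1 ≤ c) (hc : c ≤ n)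
    (hfA : (n + 1 - c).toNat < fA) (hfB : (n + 1 - c).toNat < fB) :
    computeLoopA fA n c ops =
      (let p := computeLoopB3 fB n c ops
       if 2 * p.1 ≤ n then (p.2 + 1) + (n - 2 * p.1 + 1) else p.2 + (n - p.1 + 1)) := by
  induction fA generalizing fB c ops with
  | zero => omega
  | succ f ih =>
    obtain ⟨fb, rfl⟩ : ∃ fb, fB = fb + 1 := ⟨fB - 1, by omega⟩
    unfold computeLoopA computeLoopB3
    by_cases h3 : 3 * c ≤ n
    · simp only [if_pos hc, if_pos h3]
      exact ih fb (3 * c) (ops + 1) (by omega) (by omega) (by omega) (by omega)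
    · simp only [if_pos hc, if_neg h3]
      by_cases h2 : 2 * c ≤ n
      · simp only [if_pos h2]
        rw [computeLoopA_tail f n (2 * c) (ops + 1) (by omega) (by omega) (by omega)]
        split_ifs <;> omega
      · simp only [if_neg h2]
        rw [computeLoopA_tail f n (c + 1) (ops + 1) (by omega) (by omega) (by omega)]
        split_ifs <;> omega

-- ===== VERDICT (by name: the statement is the Claim_ definition above) =====
theorem compute_operations_greedy_spec : Claim_equal_compute_operations_greedy := by
  intro n _ hpre
  obtain ⟨h1, _⟩ := hpre
  unfold Spec_compute_operations_greedy compute_operations_greedy compute_operations_greedy_alt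
  exact computeLoopA_eq (n + 1).toNat (n + 1).toNat n 1 0 (by omega) h1
    (by omega) (by omega)
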